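-- pv_equiv track=rewrite | github.com/Tonnonssi/MNISTCUSTOM-CNN-Classifier | 03.visualization/classify.py | classify_predicted
-- ===== SOURCE A (Python) =====
-- def classify_predicted(data: list):
--     zero = one = two = three = four = five = six = seven = eight = nine = 0
--     for i in data:
--         correct, predicted, arr = i
--         if predicted == 0:
--             zero += 1
--         elif predicted == 1:
--             one += 1
--         elif predicted == 2:
--             two += 1
--         elif predicted == 3:
--             three += 1
--         elif predicted == 4:
--             four += 1
--         elif predicted == 5:
--             five += 1
--         elif predicted == 6:
--             six += 1
--         elif predicted == 7:
--             seven += 1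
--         elif predicted == 8:
--             eight += 1
--         elif predicted == 9:
--             nine += 1
--
--     return [zero, one, two, three, four, five, six, seven, eight, nine]
-- ===== SOURCE B (Python) =====
-- def classify_predicted(data: list):
--     preds = [predicted for _, predicted, _ in data]
--     return [preds.count(d) for d in range(10)]
-- ===== Notes on version B (the rewrite author's own statement) =====
-- stated objective: simpler
-- what changed: Replaces the single-pass ten-counter if/elif accumulation with a no-accumulator staged decomposition: extract the predicted labels once, then answer each digit 0-9 by an independent list.count scan.
import Mathlib
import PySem

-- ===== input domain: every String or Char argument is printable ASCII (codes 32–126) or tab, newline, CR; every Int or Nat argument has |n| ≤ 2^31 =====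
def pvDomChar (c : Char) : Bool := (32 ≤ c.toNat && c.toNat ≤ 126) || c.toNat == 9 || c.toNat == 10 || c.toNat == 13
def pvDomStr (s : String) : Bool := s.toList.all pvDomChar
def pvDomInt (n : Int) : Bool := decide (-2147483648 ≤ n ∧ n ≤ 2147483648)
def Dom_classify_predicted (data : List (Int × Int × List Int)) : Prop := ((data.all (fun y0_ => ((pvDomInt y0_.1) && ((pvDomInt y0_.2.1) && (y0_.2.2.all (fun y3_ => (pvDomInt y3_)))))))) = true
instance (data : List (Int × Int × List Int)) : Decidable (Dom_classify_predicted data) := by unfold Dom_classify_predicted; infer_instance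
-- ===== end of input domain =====

-- B replaces A's single-pass ten-counter if/elif accumulation with a staged, no-accumulator
-- decomposition: extract the predicted labels once, then count each digit 0-9 by an
-- independent list.count scan (objective: simpler).

-- ===== PORT A =====
-- the ten counter variables as a 10-tuple, updated by the same if/elif chain
def pvStepA (s : Int×Int×Int×Int×Int×Int×Int×Int×Int×Int) (predicted : Int) :
    Int×Int×Int×Int×Int×Int×Int×Int×Int×Int :=
  match s with
  | (z, o, tw, th, fo, fi, si, se, ei, ni) =>
    if predicted == 0 then (z+1, o, tw, th, fo, fi, si, se, ei, ni)
    else if predicted == 1 then (z, o+1, tw, th, fo, fi, si, se, ei, ni)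
    else if predicted == 2 then (z, o, tw+1, th, fo, fi, si, se, ei, ni)
    else if predicted == 3 then (z, o, tw, th+1, fo, fi, si, se, ei, ni)
    else if predicted == 4 then (z, o, tw, th, fo+1, fi, si, se, ei, ni)
    else if predicted == 5 then (z, o, tw, th, fo, fi+1, si, se, ei, ni)
    else if predicted == 6 then (z, o, tw, th, fo, fi, si+1, se, ei, ni)
    else if predicted == 7 then (z, o, tw, th, fo, fi, si, se+1, ei, ni)
    else if predicted == 8 then (z, o, tw, th, fo, fi, si, se, ei+1, ni)
    else if predicted == 9 then (z, o, tw, th, fo, fi, si, se, ei, ni+1)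
    else (z, o, tw, th, fo, fi, si, se, ei, ni)

def classify_predicted (data : List (Int × Int × List Int)) : List Int :=
  let s := data.foldl (fun s i => pvStepA s i.2.1) (0,0,0,0,0,0,0,0,0,0)
  match s with
  | (z, o, tw, th, fo, fi, si, se, ei, ni) => [z, o, tw, th, fo, fi, si, se, ei, ni]

-- ===== PORT B =====
def classify_predicted_alt (data : List (Int × Int × List Int)) : List Int :=
  let preds := data.map (fun i => i.2.1)
  (PySem.List.pyRange 0 10 1).map (fun d => (PySem.List.count preds d : Int))

-- ===== PRECONDITION & SPEC =====
def Spec_classify_predicted (data : List (Int × Int × List Int)) (out : List Int) : Prop := out = classify_predicted_alt data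
instance (data : List (Int × Int × List Int)) (out : List Int) : Decidable (Spec_classify_predicted data out) := by unfold Spec_classify_predicted; infer_instance

-- ===== CLAIM (what is proved, stated in full; the proofs are below) =====
def Claim_equal_classify_predicted : Prop := ∀ (data : List (Int × Int × List Int)), Dom_classify_predicted data → Spec_classify_predicted data (classify_predicted data)

-- ===== LEMMAS AND PROOFS =====

-- A's fold adds, to each starting counter, the number of triples whose predicted value is that digit
lemma pvFoldA (data : List (Int × Int × List Int))
    (z o tw th fo fi si se ei ni : Int) :
    data.foldl (fun s i => pvStepA s i.2.1) (z, o, tw, th, fo, fi, si, se, ei, ni) =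
      (z + ((data.map (·.2.1)).count 0), o + ((data.map (·.2.1)).count 1),
       tw + ((data.map (·.2.1)).count 2), th + ((data.map (·.2.1)).count 3),
       fo + ((data.map (·.2.1)).count 4), fi + ((data.map (·.2.1)).count 5),
       si + ((data.map (·.2.1)).count 6), se + ((data.map (·.2.1)).count 7),
       ei + ((data.map (·.2.1)).count 8), ni + ((data.map (·.2.1)).count 9)) := by
  induction data generalizing z o tw th fo fi si se ei ni with
  | nil => simp [List.count_nil]
  | cons x xs ih =>
    simp only [List.map_cons]
    by_cases h0 : x.2.1 = 0
    · have hs : pvStepA (z, o, tw, th, fo, fi, si, se, ei, ni) x.2.1 = (z+1, o, tw, th, fo, fi, si, se, ei, ni) := by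
        simp [pvStepA, h0]
      rw [List.foldl_cons, hs, ih]
      simp [List.count_cons, h0, Prod.mk.injEq]
      omega
    · by_cases h1 : x.2.1 = 1
      · have hs : pvStepA (z, o, tw, th, fo, fi, si, se, ei, ni) x.2.1 = (z, o+1, tw, th, fo, fi, si, se, ei, ni) := by
          simp [pvStepA, h0, h1]
        rw [List.foldl_cons, hs, ih]
        simp [List.count_cons, h1, h0, Prod.mk.injEq]
        omega
      · by_cases h2 : x.2.1 = 2
        · have hs : pvStepA (z, o, tw, th, fo, fi, si, se, ei, ni) x.2.1 = (z, o, tw+1, th, fo, fi, si, se, ei, ni) := by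
            simp [pvStepA, h0, h1, h2]
          rw [List.foldl_cons, hs, ih]
          simp [List.count_cons, h2, h0, h1, Prod.mk.injEq]
          omega
        · by_cases h3 : x.2.1 = 3
          · have hs : pvStepA (z, o, tw, th, fo, fi, si, se, ei, ni) x.2.1 = (z, o, tw, th+1, fo, fi, si, se, ei, ni) := by
              simp [pvStepA, h0, h1, h2, h3]
            rw [List.foldl_cons, hs, ih]
            simp [List.count_cons, h3, h0, h1, h2, Prod.mk.injEq]
            omega
          · by_cases h4 : x.2.1 = 4
            · have hs : pvStepA (z, o, tw, th, fo, fi, si, se, ei, ni) x.2.1 = (z, o, tw, th, fo+1, fi, si, se, ei, ni) := by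
                simp [pvStepA, h0, h1, h2, h3, h4]
              rw [List.foldl_cons, hs, ih]
              simp [List.count_cons, h4, h0, h1, h2, h3, Prod.mk.injEq]
              omega
            · by_cases h5 : x.2.1 = 5
              · have hs : pvStepA (z, o, tw, th, fo, fi, si, se, ei, ni) x.2.1 = (z, o, tw, th, fo, fi+1, si, se, ei, ni) := by
                  simp [pvStepA, h0, h1, h2, h3, h4, h5]
                rw [List.foldl_cons, hs, ih]
                simp [List.count_cons, h5, h0, h1, h2, h3, h4, Prod.mk.injEq]
                omega
              · by_cases h6 : x.2.1 = 6
                · have hs : pvStepA (z, o, tw, th, fo, fi, si, se, ei, ni) x.2.1 = (z, o, tw, th, fo, fi, si+1, se, ei, ni) := by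
                    simp [pvStepA, h0, h1, h2, h3, h4, h5, h6]
                  rw [List.foldl_cons, hs, ih]
                  simp [List.count_cons, h6, h0, h1, h2, h3, h4, h5, Prod.mk.injEq]
                  omega
                · by_cases h7 : x.2.1 = 7
                  · have hs : pvStepA (z, o, tw, th, fo, fi, si, se, ei, ni) x.2.1 = (z, o, tw, th, fo, fi, si, se+1, ei, ni) := by
                      simp [pvStepA, h0, h1, h2, h3, h4, h5, h6, h7]
                    rw [List.foldl_cons, hs, ih]
                    simp [List.count_cons, h7, h0, h1, h2, h3, h4, h5, h6, Prod.mk.injEq]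
                    omega
                  · by_cases h8 : x.2.1 = 8
                    · have hs : pvStepA (z, o, tw, th, fo, fi, si, se, ei, ni) x.2.1 = (z, o, tw, th, fo, fi, si, se, ei+1, ni) := by
                        simp [pvStepA, h0, h1, h2, h3, h4, h5, h6, h7, h8]
                      rw [List.foldl_cons, hs, ih]
                      simp [List.count_cons, h8, h0, h1, h2, h3, h4, h5, h6, h7, Prod.mk.injEq]
                      omega
                    · by_cases h9 : x.2.1 = 9
                      · have hs : pvStepA (z, o, tw, th, fo, fi, si, se, ei, ni) x.2.1 = (z, o, tw, th, fo, fi, si, se, ei, ni+1) := by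
                          simp [pvStepA, h0, h1, h2, h3, h4, h5, h6, h7, h8, h9]
                        rw [List.foldl_cons, hs, ih]
                        simp [List.count_cons, h9, h0, h1, h2, h3, h4, h5, h6, h7, h8, Prod.mk.injEq]
                        omega
                      · have hs : pvStepA (z, o, tw, th, fo, fi, si, se, ei, ni) x.2.1 = (z, o, tw, th, fo, fi, si, se, ei, ni) := by
                          simp [pvStepA, h0, h1, h2, h3, h4, h5, h6, h7, h8, h9]
                        rw [List.foldl_cons, hs, ih]
                        simp [List.count_cons, h0, h1, h2, h3, h4, h5, h6, h7, h8, h9]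

-- ===== VERDICT (by name: the statement is the Claim_ definition above) =====
theorem classify_predicted_spec : Claim_equal_classify_predicted := by
  intro data _
  unfold Spec_classify_predicted classify_predicted_alt classify_predicted
  rw [pvFoldA]
  have hr : PySem.List.pyRange 0 10 1 = [0, 1, 2, 3, 4, 5, 6, 7, 8, 9] := by decide
  rw [hr]
  simp [PySem.List.count]
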